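-- pv_equiv track=rewrite | github.com/Emberfield/autodoc | src/autodoc/autodoc.py | _calculate_complexity_distribution
-- ===== SOURCE A (Python) =====
-- from typing import Any, Dict, List
--
-- def _calculate_complexity_distribution(files: Dict[str, Any]) -> Dict[str, int]:
--     """Calculate complexity distribution across files."""
--     distribution = {"low": 0, "medium": 0, "high": 0}
--
--     for file_data in files.values():
--         score = file_data["complexity_score"]
--         if score <= 5:
--             distribution["low"] += 1
--         elif score <= 15:
--             distribution["medium"] += 1
--         else:
--             distribution["high"] += 1
--
--     return distribution
-- ===== SOURCE B (Python) =====
-- from typing import Any, Dict, List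
--
--
-- def _calculate_complexity_distribution(files: Dict[str, Any]) -> Dict[str, int]:
--     """Calculate complexity distribution across files."""
--     scores = [file_data["complexity_score"] for file_data in files.values()]
--     low = sum(1 for s in scores if s <= 5)
--     medium = sum(1 for s in scores if 5 < s <= 15)
--     return {"low": low, "medium": medium, "high": len(scores) - low - medium}
-- ===== Notes on version B (the rewrite author's own statement) =====
-- stated objective: simpler
-- what changed: Replaces the stateful loop that increments a mutable counter dict through an if/elif/else cascade with a score-list comprehension, two declarative count-sums for the low and medium buckets, and the high bucket computed by subtraction from the total.
import Mathlib
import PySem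

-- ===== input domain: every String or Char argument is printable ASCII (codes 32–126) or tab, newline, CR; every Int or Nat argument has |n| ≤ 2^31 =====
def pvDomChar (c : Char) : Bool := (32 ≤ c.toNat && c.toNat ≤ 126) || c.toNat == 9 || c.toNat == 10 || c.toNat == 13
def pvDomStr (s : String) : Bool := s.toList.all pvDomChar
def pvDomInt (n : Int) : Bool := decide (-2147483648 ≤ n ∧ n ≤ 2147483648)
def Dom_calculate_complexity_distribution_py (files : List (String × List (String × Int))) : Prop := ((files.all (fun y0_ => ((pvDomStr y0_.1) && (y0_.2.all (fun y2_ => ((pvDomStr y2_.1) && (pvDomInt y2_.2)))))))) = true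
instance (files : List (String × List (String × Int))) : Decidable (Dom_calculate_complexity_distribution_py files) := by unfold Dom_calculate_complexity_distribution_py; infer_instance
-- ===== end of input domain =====

-- B replaces A's mutable counter dict fed through an if/elif/else cascade by two
-- declarative count-sums plus a subtraction for the "high" bucket (objective: simpler).

-- ===== PORT A =====
-- file_data["complexity_score"]: first-match association-list lookup (KeyError = none,
-- excluded by Pre_; the 0 default is never used inside Pre_)
def pvGetScore (fd : List (String × Int)) : Int :=
  (((fd.find? (fun p => p.1 == "complexity_score")).map Prod.snd).getD 0)

def calculate_complexity_distribution_py (files : List (String × List (String × Int))) : List (String × Int) :=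
  (files.foldl (fun d f =>
      let score := pvGetScore f.2
      if score ≤ 5 then d.insert "low" (d.getD "low" 0 + 1)
      else if score ≤ 15 then d.insert "medium" (d.getD "medium" 0 + 1)
      else d.insert "high" (d.getD "high" 0 + 1))
    (PySem.Dict.ofList [("low", 0), ("medium", 0), ("high", 0)])).items

-- ===== PORT B =====
def calculate_complexity_distribution_py_alt (files : List (String × List (String × Int))) : List (String × Int) :=
  let scores := files.map (fun f => pvGetScore f.2)
  let low : Int := scores.countP (fun s => decide (s ≤ 5))
  let medium : Int := scores.countP (fun s => decide (5 < s ∧ s ≤ 15))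
  [("low", low), ("medium", medium), ("high", (scores.length : Int) - low - medium)]

-- ===== PRECONDITION & SPEC =====
-- Pre_ excludes exactly the inputs where some file_data lacks the "complexity_score"
-- key, on which the Python A (and B) raises KeyError.
def Pre_calculate_complexity_distribution_py (files : List (String × List (String × Int))) : Prop :=
  (files.all (fun f => f.2.any (fun p => p.1 == "complexity_score"))) = true
instance (files : List (String × List (String × Int))) : Decidable (Pre_calculate_complexity_distribution_py files) := by unfold Pre_calculate_complexity_distribution_py; infer_instance

def pvWitness_calculate_complexity_distribution_py : (List (String × List (String × Int))) :=
  [("a.py", [("complexity_score", 3)]), ("b.py", [("complexity_score", 20)])]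

def Spec_calculate_complexity_distribution_py (files : List (String × List (String × Int))) (out : List (String × Int)) : Prop := out = calculate_complexity_distribution_py_alt files
instance (files : List (String × List (String × Int))) (out : List (String × Int)) : Decidable (Spec_calculate_complexity_distribution_py files out) := by unfold Spec_calculate_complexity_distribution_py; infer_instance

-- ===== CLAIM (what is proved, stated in full; the proofs are below) =====
def Claim_equal_calculate_complexity_distribution_py : Prop := ∀ (files : List (String × List (String × Int))), Dom_calculate_complexity_distribution_py files → Pre_calculate_complexity_distribution_py files → Spec_calculate_complexity_distribution_py files (calculate_complexity_distribution_py files)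

-- ===== LEMMAS AND PROOFS =====

-- Invariant of A's loop: starting from the three-key dict with values (a, b, c), the fold
-- over a score list ends with each bucket's count added to its starting value.
theorem pvFoldItems (l : List Int) (a b c : Int) :
    (l.foldl (fun d s =>
        if s ≤ 5 then d.insert "low" (d.getD "low" 0 + 1)
        else if s ≤ 15 then d.insert "medium" (d.getD "medium" 0 + 1)
        else d.insert "high" (d.getD "high" 0 + 1))
      (PySem.Dict.mk [("low", a), ("medium", b), ("high", c)])).items
    = [("low", a + l.countP (fun s => decide (s ≤ 5))),
       ("medium", b + l.countP (fun s => decide (5 < s ∧ s ≤ 15))),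
       ("high", c + l.countP (fun s => decide (15 < s)))] := by
  induction l generalizing a b c with
  | nil => simp
  | cons s l ih =>
    by_cases h1 : s ≤ 5
    · have hins : (PySem.Dict.mk [("low", a), ("medium", b), ("high", c)]).insert "low"
          ((PySem.Dict.mk [("low", a), ("medium", b), ("high", c)]).getD "low" 0 + 1)
          = PySem.Dict.mk [("low", a + 1), ("medium", b), ("high", c)] := rfl
      have hm : ¬(5 < s ∧ s ≤ 15) := by omega
      have hh : ¬(15 < s) := by omega
      simp only [List.foldl_cons, if_pos h1, hins, ih, List.countP_cons]
      simp [h1, hm, hh]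
      ring
    · by_cases h2 : s ≤ 15
      · have hins : (PySem.Dict.mk [("low", a), ("medium", b), ("high", c)]).insert "medium"
            ((PySem.Dict.mk [("low", a), ("medium", b), ("high", c)]).getD "medium" 0 + 1)
            = PySem.Dict.mk [("low", a), ("medium", b + 1), ("high", c)] := rfl
        have hmid : (5 < s ∧ s ≤ 15) := ⟨by omega, h2⟩
        have hh : ¬(15 < s) := by omega
        simp only [List.foldl_cons, if_neg h1, if_pos h2, hins, ih, List.countP_cons]
        simp [h1, hmid, hh]
        ring
      · have hins : (PySem.Dict.mk [("low", a), ("medium", b), ("high", c)]).insert "high"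
            ((PySem.Dict.mk [("low", a), ("medium", b), ("high", c)]).getD "high" 0 + 1)
            = PySem.Dict.mk [("low", a), ("medium", b), ("high", c + 1)] := rfl
        have hm : ¬(5 < s ∧ s ≤ 15) := by omega
        have hh : (15 < s) := by omega
        simp only [List.foldl_cons, if_neg h1, if_neg h2, hins, ih, List.countP_cons]
        simp [h1, hm, hh]
        ring

-- The three buckets partition the list, so high = length - low - medium.
theorem pvCountHigh (l : List Int) :
    (l.countP (fun s => decide (15 < s)) : Int)
      = (l.length : Int) - l.countP (fun s => decide (s ≤ 5))
        - l.countP (fun s => decide (5 < s ∧ s ≤ 15)) := by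
  induction l with
  | nil => simp
  | cons s l ih =>
    simp only [List.countP_cons, List.length_cons]
    by_cases h1 : s ≤ 5
    · simp [h1]
      simp only [Bool.decide_and] at ih
      omega
    · by_cases h2 : s ≤ 15
      · simp [h1, (⟨by omega, h2⟩ : (5 < s ∧ s ≤ 15))]
        simp only [Bool.decide_and] at ih
        omega
      · simp [h1, h2, (by omega : (15 < s))]
        simp only [Bool.decide_and] at ih
        omega

-- ===== VERDICT (by name: the statement is the Claim_ definition above) =====
theorem calculate_complexity_distribution_py_spec : Claim_equal_calculate_complexity_distribution_py := by
  intro files _ _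
  unfold Spec_calculate_complexity_distribution_py
  show (files.foldl (fun d f =>
      if pvGetScore f.2 ≤ 5 then d.insert "low" (d.getD "low" 0 + 1)
      else if pvGetScore f.2 ≤ 15 then d.insert "medium" (d.getD "medium" 0 + 1)
      else d.insert "high" (d.getD "high" 0 + 1))
    (PySem.Dict.mk [("low", 0), ("medium", 0), ("high", 0)])).items
    = [("low", ((files.map (fun f => pvGetScore f.2)).countP (fun s => decide (s ≤ 5)) : Int)),
       ("medium", ((files.map (fun f => pvGetScore f.2)).countP (fun s => decide (5 < s ∧ s ≤ 15)) : Int)),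
       ("high", ((files.map (fun f => pvGetScore f.2)).length : Int)
          - (files.map (fun f => pvGetScore f.2)).countP (fun s => decide (s ≤ 5))
          - (files.map (fun f => pvGetScore f.2)).countP (fun s => decide (5 < s ∧ s ≤ 15)))]
  rw [← List.foldl_map (f := fun f : String × List (String × Int) => pvGetScore f.2)
      (g := fun (d : PySem.Dict String Int) (s : Int) =>
        if s ≤ 5 then d.insert "low" (d.getD "low" 0 + 1)
        else if s ≤ 15 then d.insert "medium" (d.getD "medium" 0 + 1)
        else d.insert "high" (d.getD "high" 0 + 1))]
  rw [pvFoldItems]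
  simp only [zero_add]
  rw [pvCountHigh]
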